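-- pv_equiv track=rewrite | github.com/TomNichols/AdventOfCode2022 | Day8.py | add_visible_trees_row
-- ===== SOURCE A (Python) =====
-- def add_visible_trees_row(visible_trees, line, row_idx, direction):
--     largest = -1
--     if direction == "left":
--         col_idx = 0
--     else:
--         col_idx = len(line)-1
--     for char in line:
--         if int(char) > largest:
--             largest = int(char)
--             visible_trees += [[row_idx, col_idx]]
--         if direction == "left":
--             col_idx += 1
--         else:
--             col_idx -= 1
--     return visible_trees
-- ===== SOURCE B (Python) =====
-- def add_visible_trees_row(visible_trees, line, row_idx, direction):
--     # Pass 1: table of prefix maxima (prev_max[i] = max height strictly before i, -1 initially).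
--     prev_max = []
--     m = -1
--     for char in line:
--         prev_max.append(m)
--         m = max(m, int(char))
--     # Pass 2: selection — a tree is visible iff it beats every earlier tree.
--     n = len(line)
--     for i, char in enumerate(line):
--         if int(char) > prev_max[i]:
--             visible_trees.append([row_idx, i if direction == "left" else n - 1 - i])
--     return visible_trees
-- ===== Notes on version B (the rewrite author's own statement) =====
-- stated objective: alternative
-- what changed: Replaces A's single stateful scan (running max + manually stepped directional column counter) by two separate passes: first build a prefix-maxima table, then a selection pass over enumerate(line) that emits [row_idx, i or n-1-i] whenever the tree beats its prefix maximum.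
import Mathlib
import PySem

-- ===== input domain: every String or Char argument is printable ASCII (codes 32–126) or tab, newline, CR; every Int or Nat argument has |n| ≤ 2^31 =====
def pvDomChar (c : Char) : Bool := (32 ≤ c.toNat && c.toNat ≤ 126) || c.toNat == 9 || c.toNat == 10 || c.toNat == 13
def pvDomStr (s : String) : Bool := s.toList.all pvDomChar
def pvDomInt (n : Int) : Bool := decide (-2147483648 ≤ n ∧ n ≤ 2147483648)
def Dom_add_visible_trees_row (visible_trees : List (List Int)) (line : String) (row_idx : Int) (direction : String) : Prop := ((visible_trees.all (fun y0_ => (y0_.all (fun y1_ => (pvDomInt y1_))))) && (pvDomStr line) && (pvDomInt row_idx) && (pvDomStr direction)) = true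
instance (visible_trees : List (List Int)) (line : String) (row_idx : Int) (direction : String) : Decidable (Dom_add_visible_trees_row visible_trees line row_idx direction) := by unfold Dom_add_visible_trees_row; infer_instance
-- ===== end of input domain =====

-- B replaces A's single stateful scan by two passes (prefix-maxima table, then a selection pass
-- over enumerate); equal return values proved on lines of digits. Note: the Python A mutates
-- visible_trees in place (B does too); the proof is about the returned value.


-- int(char) for a one-character string (exact on digits, the domain Pre_ admits)
def pyIntChar (c : Char) : Int := (PySem.Int.ofStr? (String.singleton c)).getD 0

-- ===== PORT A =====
-- A's single for-loop: state (largest, col_idx, visible_trees), stepped exactly as in the Python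
def pvLoopA (row_idx : Int) (direction : String) : List Char → Int → Int → List (List Int) → List (List Int)
  | [], _, _, vt => vt
  | c :: cs, largest, col, vt =>
    if pyIntChar c > largest then
      pvLoopA row_idx direction cs (pyIntChar c)
        (if direction = "left" then col + 1 else col - 1) (vt ++ [[row_idx, col]])
    else
      pvLoopA row_idx direction cs largest
        (if direction = "left" then col + 1 else col - 1) vt

def add_visible_trees_row (visible_trees : List (List Int)) (line : String) (row_idx : Int) (direction : String) : List (List Int) :=
  pvLoopA row_idx direction line.toList (-1)
    (if direction = "left" then 0 else (line.toList.length : Int) - 1) visible_trees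

-- ===== PORT B =====
-- pass 1 of B: build the prefix-maxima table prev_max (append m, then raise m)
def pvBuild : List Char → List Int → Int → List Int
  | [], acc, _ => acc
  | c :: cs, acc, m => pvBuild cs (acc ++ [m]) (max m (pyIntChar c))

-- pass 2 of B: selection over enumerate(line), looking the prefix maximum up in the table
def pvSelect (row_idx : Int) (direction : String) (n : Int) (prevMax : List Int) : List (Int × Char) → List (List Int) → List (List Int)
  | [], vt => vt
  | p :: ps, vt =>
    if pyIntChar p.2 > PySem.List.pyGetD prevMax p.1 0 then
      pvSelect row_idx direction n prevMax ps
        (vt ++ [[row_idx, if direction = "left" then p.1 else n - 1 - p.1]])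
    else
      pvSelect row_idx direction n prevMax ps vt

def add_visible_trees_row_alt (visible_trees : List (List Int)) (line : String) (row_idx : Int) (direction : String) : List (List Int) :=
  pvSelect row_idx direction (line.toList.length : Int) (pvBuild line.toList [] (-1))
    (PySem.List.enumerate line.toList 0) visible_trees

-- ===== PRECONDITION & SPEC =====
-- Pre_ excludes exactly the lines with a non-digit character, where Python's int(char) raises ValueError.
def Pre_add_visible_trees_row (visible_trees : List (List Int)) (line : String) (row_idx : Int) (direction : String) : Prop :=
  line.toList.all Char.isDigit = true
instance (visible_trees : List (List Int)) (line : String) (row_idx : Int) (direction : String) : Decidable (Pre_add_visible_trees_row visible_trees line row_idx direction) := by unfold Pre_add_visible_trees_row; infer_instance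
def pvWitness_add_visible_trees_row : List (List Int) × String × Int × String := ([[0, 2]], "30373", 1, "left")
def Spec_add_visible_trees_row (visible_trees : List (List Int)) (line : String) (row_idx : Int) (direction : String) (out : List (List Int)) : Prop := out = add_visible_trees_row_alt visible_trees line row_idx direction
instance (visible_trees : List (List Int)) (line : String) (row_idx : Int) (direction : String) (out : List (List Int)) : Decidable (Spec_add_visible_trees_row visible_trees line row_idx direction out) := by unfold Spec_add_visible_trees_row; infer_instance

-- ===== CLAIM (what is proved, stated in full; the proofs are below) =====
def Claim_equal_add_visible_trees_row : Prop := ∀ (visible_trees : List (List Int)) (line : String) (row_idx : Int) (direction : String), Dom_add_visible_trees_row visible_trees line row_idx direction → Pre_add_visible_trees_row visible_trees line row_idx direction → Spec_add_visible_trees_row visible_trees line row_idx direction (add_visible_trees_row visible_trees line row_idx direction)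

-- ===== LEMMAS AND PROOFS =====

-- the common specification of what one directional scan emits
def pvEmit (row δ : Int) : List Char → Int → Int → List (List Int)
  | [], _, _ => []
  | c :: cs, m, col =>
    if pyIntChar c > m then [row, col] :: pvEmit row δ cs (pyIntChar c) (col + δ)
    else pvEmit row δ cs m (col + δ)

-- prefix-maxima table, structurally
def pvPM : List Char → Int → List Int
  | [], _ => []
  | c :: cs, m => m :: pvPM cs (max m (pyIntChar c))

theorem loopA_emit (row : Int) (dir : String) (cs : List Char) : ∀ (m col : Int) (vt : List (List Int)),
    pvLoopA row dir cs m col vt = vt ++ pvEmit row (if dir = "left" then 1 else -1) cs m col := by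
  induction cs with
  | nil => intro m col vt; simp [pvLoopA, pvEmit]
  | cons c cs ih =>
    intro m col vt
    by_cases hd : dir = "left"
    · subst hd
      by_cases h : pyIntChar c > m <;>
        simp only [pvLoopA, pvEmit, h, ite_true, ite_false, ih] <;> simp
    · by_cases h : pyIntChar c > m <;>
        simp only [pvLoopA, pvEmit, h, hd, ite_true, ite_false, ih,
          show col - 1 = col + (-1) from by ring] <;> simp

theorem build_pm (cs : List Char) : ∀ (acc : List Int) (m : Int),
    pvBuild cs acc m = acc ++ pvPM cs m := by
  induction cs with
  | nil => intro acc m; simp [pvBuild, pvPM]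
  | cons c cs ih => intro acc m; simp [pvBuild, pvPM, ih]

theorem select_emit (row : Int) (dir : String) (n : Int) (P : List Int) (cs : List Char) :
    ∀ (k : Nat) (m : Int) (vt : List (List Int)), P.drop k = pvPM cs m →
    pvSelect row dir n P (PySem.List.enumerate cs (k : Int)) vt
    = vt ++ pvEmit row (if dir = "left" then 1 else -1) cs m (if dir = "left" then (k : Int) else n - 1 - (k : Int)) := by
  induction cs with
  | nil => intro k m vt _; simp [PySem.List.enumerate_nil, pvSelect, pvEmit]
  | cons c cs ih =>
    intro k m vt hP
    have hget : PySem.List.pyGetD P ((k : Nat) : Int) 0 = m := by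
      rw [PySem.List.pyGetD_natCast]
      have h1 : (P.drop k).head? = some m := by rw [hP]; rfl
      rw [List.head?_drop] at h1
      simp [List.getD_eq_getElem?_getD, h1]
    have hdrop : P.drop (k + 1) = pvPM cs (max m (pyIntChar c)) := by
      have h2 := congrArg List.tail hP
      simpa [List.tail_drop, pvPM] using h2
    have hcast : ((k : Int) + 1) = ((k + 1 : Nat) : Int) := by push_cast; ring
    rw [PySem.List.enumerate_cons]
    by_cases h : pyIntChar c > m
    · have hm : max m (pyIntChar c) = pyIntChar c := by omega
      rw [pvSelect, if_pos (by rw [hget]; exact h), hcast,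
        ih (k + 1) (max m (pyIntChar c)) _ hdrop, hm]
      by_cases hd : dir = "left"
      · rw [show ((k + 1 : Nat) : Int) = (k : Int) + 1 from hcast.symm]
        simp [pvEmit, h, hd]
      · rw [show n - 1 - ((k + 1 : Nat) : Int) = (n - 1 - (k : Int)) + (-1) from by push_cast; ring]
        simp [pvEmit, h, hd]
    · have hm : max m (pyIntChar c) = m := by omega
      rw [pvSelect, if_neg (by rw [hget]; exact h), hcast,
        ih (k + 1) (max m (pyIntChar c)) _ hdrop, hm]
      by_cases hd : dir = "left"
      · rw [show ((k + 1 : Nat) : Int) = (k : Int) + 1 from hcast.symm]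
        simp [pvEmit, h, hd]
      · rw [show n - 1 - ((k + 1 : Nat) : Int) = (n - 1 - (k : Int)) + (-1) from by push_cast; ring]
        simp [pvEmit, h, hd]

-- ===== VERDICT (by name: the statement is the Claim_ definition above) =====
theorem add_visible_trees_row_spec : Claim_equal_add_visible_trees_row := by
  intro vt line row dir _ _
  unfold Spec_add_visible_trees_row add_visible_trees_row add_visible_trees_row_alt
  rw [loopA_emit]
  have hsel := select_emit row dir (line.toList.length : Int) (pvBuild line.toList [] (-1))
    line.toList 0 (-1) vt (by rw [build_pm]; simp)
  rw [Nat.cast_zero] at hsel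
  rw [hsel]
  by_cases hd : dir = "left" <;> simp [hd]
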